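-- pv_equiv track=rewrite | github.com/u4mp44/vizn-UserBot | friendly-telegram/modules/loader.py | unescape_percent
-- ===== SOURCE A (Python) =====
-- def unescape_percent(text):
--     i = 0
--     ln = len(text)
--     is_handling_percent = False
--     out = ""
--     while i < ln:
--         char = text[i]
--         if char == "%" and not is_handling_percent:
--             is_handling_percent = True
--             i += 1
--             continue
--         if char == "d" and is_handling_percent:
--             out += "."
--             is_handling_percent = False
--             i += 1
--             continue
--         out += char
--         is_handling_percent = False
--         i += 1
--     return out
-- ===== SOURCE B (Python) =====
-- def unescape_percent(text):
--     # Consume characters pairwise: a '%' swallows the next character,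
--     # emitting '.' for 'd' and the character itself otherwise (nothing
--     # for a trailing lone '%'); no handling flag is carried.
--     out = []
--     it = iter(text)
--     for c in it:
--         if c == "%":
--             c2 = next(it, None)
--             if c2 is None:
--                 break
--             out.append("." if c2 == "d" else c2)
--         else:
--             out.append(c)
--     return "".join(out)
-- ===== Notes on version B (the rewrite author's own statement) =====
-- stated objective: simpler
-- what changed: Replaced the index/flag state machine with repeated string concatenation by a pairwise consumer: each '%' directly swallows its following character, appending to a list joined once at the end, so no handling flag exists.
import Mathlib
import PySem

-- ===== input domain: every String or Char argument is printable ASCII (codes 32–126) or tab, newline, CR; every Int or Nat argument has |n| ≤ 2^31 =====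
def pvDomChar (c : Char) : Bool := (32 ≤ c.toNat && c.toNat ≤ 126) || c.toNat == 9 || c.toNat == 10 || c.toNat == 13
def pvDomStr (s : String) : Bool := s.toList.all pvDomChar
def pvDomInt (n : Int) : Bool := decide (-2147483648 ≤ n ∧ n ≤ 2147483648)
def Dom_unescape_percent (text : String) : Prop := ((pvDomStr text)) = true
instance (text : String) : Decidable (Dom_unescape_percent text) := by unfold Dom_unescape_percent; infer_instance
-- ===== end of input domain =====

-- B replaces A's index/flag state machine by a pairwise consumer ('%' swallows the next char); simpler, same return value.

-- ===== PORT A =====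
-- A's while loop advances i by 1 each iteration carrying (is_handling_percent, out):
-- ported as a left-to-right recursion over the remaining characters with that same state.
def pvAGo : List Char → Bool → List Char → List Char
  | [], _, out => out
  | c :: rest, flag, out =>
    if c = '%' ∧ flag = false then pvAGo rest true out
    else if c = 'd' ∧ flag = true then pvAGo rest false (out ++ ['.'])
    else pvAGo rest false (out ++ [c])

def unescape_percent (text : String) : String := String.ofList (pvAGo text.toList false [])

-- ===== PORT B =====
-- B consumes the input pairwise: '%' swallows its successor in one step, no flag state.
def pvBGo : List Char → List Char
  | [] => []
  | c :: rest =>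
    if c = '%' then
      match rest with
      | [] => []
      | c2 :: rest2 => (if c2 = 'd' then '.' else c2) :: pvBGo rest2
    else c :: pvBGo rest

def unescape_percent_alt (text : String) : String := String.ofList (pvBGo text.toList)

-- ===== PRECONDITION & SPEC =====
def Spec_unescape_percent (text : String) (out : String) : Prop := out = unescape_percent_alt text
instance (text : String) (out : String) : Decidable (Spec_unescape_percent text out) := by unfold Spec_unescape_percent; infer_instance

-- ===== CLAIM (what is proved, stated in full; the proofs are below) =====
def Claim_equal_unescape_percent : Prop := ∀ (text : String), Dom_unescape_percent text → Spec_unescape_percent text (unescape_percent text)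

-- ===== LEMMAS AND PROOFS =====

-- what A's loop produces from the flag-set state on the remaining input
def pvFlagStep : List Char → List Char
  | [] => []
  | c :: rest => (if c = 'd' then '.' else c) :: pvBGo rest

theorem pvBGo_cons (c : Char) (rest : List Char) :
    pvBGo (c :: rest) = if c = '%' then pvFlagStep rest else c :: pvBGo rest := by
  cases rest <;> by_cases h : c = '%' <;> simp [pvBGo, pvFlagStep, h]

theorem pvAGo_spec (l : List Char) :
    (∀ out, pvAGo l false out = out ++ pvBGo l) ∧
    (∀ out, pvAGo l true out = out ++ pvFlagStep l) := by
  induction l with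
  | nil => simp [pvAGo, pvBGo, pvFlagStep]
  | cons c rest ih =>
    refine ⟨fun out => ?_, fun out => ?_⟩
    · rw [pvAGo, pvBGo_cons]
      by_cases h : c = '%' <;> simp [h, ih.1, ih.2]
    · rw [pvAGo, pvFlagStep]
      by_cases h : c = 'd' <;> simp [h, ih.1]

-- ===== VERDICT (by name: the statement is the Claim_ definition above) =====
theorem unescape_percent_spec : Claim_equal_unescape_percent := by
  intro text _
  unfold Spec_unescape_percent unescape_percent unescape_percent_alt
  rw [(pvAGo_spec text.toList).1]
  simp
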